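-- pv_equiv track=rewrite | github.com/openvinotoolkit/nncf | tests/torch/quantization/test_hawq_precision_init.py | get_size_of_search_space
-- ===== SOURCE A (Python) =====
-- import math
--
-- def get_size_of_search_space(m, L):
--     def nCr(n, r):
--         f = math.factorial
--         return f(n) // f(r) // f(n - r)
--
--     ref_num = 0
--     for j in range(1, m + 1):
--         ref_num += nCr(m, j) * nCr(L - 1, j - 1)
--     return ref_num
-- ===== SOURCE B (Python) =====
-- import math
--
-- def get_size_of_search_space(m, L):
--     # Vandermonde's identity: sum_{j=1}^{m} C(m,j)*C(L-1,j-1) = C(m+L-1, m-1)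
--     if m <= 0:
--         return 0
--     return math.comb(m + L - 1, m - 1)
-- ===== Notes on version B (the rewrite author's own statement) =====
-- stated objective: faster
-- what changed: Replaced the loop of m factorial-based binomial products by the single closed-form binomial C(m+L-1, m-1) given by Vandermonde's identity.
import Mathlib
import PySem

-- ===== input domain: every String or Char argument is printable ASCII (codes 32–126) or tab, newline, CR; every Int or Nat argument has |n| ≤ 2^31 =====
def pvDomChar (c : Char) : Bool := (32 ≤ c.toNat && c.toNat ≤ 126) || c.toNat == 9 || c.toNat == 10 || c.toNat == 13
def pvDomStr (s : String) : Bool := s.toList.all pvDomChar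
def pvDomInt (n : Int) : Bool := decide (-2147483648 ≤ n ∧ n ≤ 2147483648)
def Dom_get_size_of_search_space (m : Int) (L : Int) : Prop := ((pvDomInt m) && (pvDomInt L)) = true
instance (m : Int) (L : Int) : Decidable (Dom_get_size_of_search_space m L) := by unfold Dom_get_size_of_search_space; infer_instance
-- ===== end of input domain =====

-- B replaces A's loop of m factorial-based binomials by the single closed-form
-- binomial C(m+L-1, m-1) (Vandermonde's identity): objective = faster.

-- ===== PORT A =====
-- math.factorial; exact for n ≥ 0 (Python raises ValueError for n < 0; such calls are excluded by Pre_)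
def pyFactorial (n : Int) : Int := (Nat.factorial n.toNat : Int)

-- inner helper nCr of A: f(n) // f(r) // f(n - r)
def pyNCr (n : Int) (r : Int) : Int :=
  PySem.Int.floordiv (PySem.Int.floordiv (pyFactorial n) (pyFactorial r)) (pyFactorial (n - r))

def get_size_of_search_space (m : Int) (L : Int) : Int :=
  (PySem.List.pyRange 1 (m + 1) 1).foldl
    (fun ref_num j => ref_num + pyNCr m j * pyNCr (L - 1) (j - 1)) 0

-- ===== PORT B =====
def get_size_of_search_space_alt (m : Int) (L : Int) : Int :=
  if m ≤ 0 then 0 else (Nat.choose (m + L - 1).toNat (m - 1).toNat : Int)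

-- ===== PRECONDITION & SPEC =====
-- A raises ValueError (factorial of a negative number) when m ≥ 1 and L < m.
def Pre_get_size_of_search_space (m : Int) (L : Int) : Prop := m ≤ 0 ∨ m ≤ L
instance (m : Int) (L : Int) : Decidable (Pre_get_size_of_search_space m L) := by
  unfold Pre_get_size_of_search_space; infer_instance

def pvWitness_get_size_of_search_space : Int × Int := (2, 3)

def Spec_get_size_of_search_space (m : Int) (L : Int) (out : Int) : Prop :=
  out = get_size_of_search_space_alt m L
instance (m : Int) (L : Int) (out : Int) : Decidable (Spec_get_size_of_search_space m L out) := by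
  unfold Spec_get_size_of_search_space; infer_instance

-- ===== CLAIM (what is proved, stated in full; the proofs are below) =====
def Claim_equal_get_size_of_search_space : Prop := ∀ (m : Int) (L : Int),
  Dom_get_size_of_search_space m L → Pre_get_size_of_search_space m L →
  Spec_get_size_of_search_space m L (get_size_of_search_space m L)

-- ===== LEMMAS AND PROOFS =====

-- factorial-quotient form of the binomial coefficient, in Nat
lemma fact_div_div (n r : Nat) (h : r ≤ n) :
    Nat.factorial n / Nat.factorial r / Nat.factorial (n - r) = Nat.choose n r := by
  rw [← Nat.choose_mul_factorial_mul_factorial h]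
  rw [show Nat.choose n r * Nat.factorial r * Nat.factorial (n - r)
      = (Nat.choose n r * Nat.factorial (n - r)) * Nat.factorial r by ring]
  rw [Nat.mul_div_cancel _ (Nat.factorial_pos r),
      Nat.mul_div_cancel _ (Nat.factorial_pos (n - r))]

-- A's nCr equals Nat.choose for 0 ≤ r ≤ n
lemma pyNCr_eq_choose (n r : Int) (h0 : 0 ≤ r) (h : r ≤ n) :
    pyNCr n r = (Nat.choose n.toNat r.toNat : Int) := by
  have hn : 0 ≤ n := le_trans h0 h
  unfold pyNCr pyFactorial
  have hsub : (n - r).toNat = n.toNat - r.toNat := by omega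
  rw [hsub, PySem.Int.floordiv_natCast, PySem.Int.floordiv_natCast,
      fact_div_div n.toNat r.toNat (by omega)]

-- the sum, after reindexing, is Vandermonde's
lemma sum_shift_vandermonde (M N : Nat) (hM : 1 ≤ M) :
    ∑ k ∈ Finset.range M, Nat.choose M (k + 1) * Nat.choose N k
      = Nat.choose (M + N) (M - 1) := by
  rw [← Finset.sum_range_reflect]
  have step : ∀ k ∈ Finset.range M,
      Nat.choose M (M - 1 - k + 1) * Nat.choose N (M - 1 - k)
        = Nat.choose M k * Nat.choose N (M - 1 - k) := by
    intro k hk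
    rw [Finset.mem_range] at hk
    have h1 : M - 1 - k + 1 = M - k := by omega
    rw [h1, Nat.choose_symm (by omega)]
  rw [Finset.sum_congr rfl step]
  rw [Nat.add_choose_eq M N (M - 1), Finset.Nat.sum_antidiagonal_eq_sum_range_succ_mk]
  have h2 : (M - 1).succ = M := by omega
  rw [h2]

-- list-sum over a range = finset-sum over a range
lemma sum_map_range (f : Nat → Int) (n : Nat) :
    ((List.range n).map f).sum = ∑ k ∈ Finset.range n, f k := by
  induction n with
  | zero => simp
  | succ n ih => simp [List.range_succ, Finset.sum_range_succ, ih]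

-- fold of A's loop body = the finset sum of the terms
lemma foldl_add_sum (f : Int → Int) (l : List Int) (init : Int) :
    l.foldl (fun acc j => acc + f j) init = init + (l.map f).sum := by
  induction l generalizing init with
  | nil => simp
  | cons x xs ih => simp [ih, add_assoc]

-- ===== VERDICT (by name: the statement is the Claim_ definition above) =====
theorem get_size_of_search_space_spec : Claim_equal_get_size_of_search_space := by
  intro m L _ hpre
  unfold Spec_get_size_of_search_space get_size_of_search_space get_size_of_search_space_alt
  by_cases hm : m ≤ 0
  · rw [PySem.List.pyRange_one_eq_nil (by omega)]
    simp [hm]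
  · have hm1 : 1 ≤ m := by omega
    have hL : m ≤ L := by rcases hpre with h | h; omega; exact h
    rw [if_neg hm]
    set M := m.toNat with hM
    set N := (L - 1).toNat with hN
    have hmM : m = (M : Int) := by omega
    have hLN : L - 1 = (N : Int) := by omega
    have hMN : M ≤ N + 1 := by omega
    -- rewrite the range and the fold into a sum
    rw [PySem.List.pyRange_one 1 (m + 1), foldl_add_sum, zero_add, List.map_map]
    have hK : (m + 1 - 1).toNat = M := by omega
    rw [hK, sum_map_range]
    have hterm : ∀ k ∈ Finset.range M,
        ((fun j => pyNCr m j * pyNCr (L - 1) (j - 1)) ∘ (fun k : Nat => 1 + (k : Int))) k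
          = ((Nat.choose M (k + 1) * Nat.choose N k : Nat) : Int) := by
      intro k hk
      rw [Finset.mem_range] at hk
      simp only [Function.comp]
      rw [show (1 : Int) + (k : Int) - 1 = (k : Int) by ring]
      rw [pyNCr_eq_choose m (1 + (k : Int)) (by omega) (by omega),
          pyNCr_eq_choose (L - 1) (k : Int) (by omega) (by omega)]
      have e1 : ((1 : Int) + (k : Int)).toNat = k + 1 := by omega
      have e2 : ((k : Int)).toNat = k := by omega
      rw [e1, e2, ← hM, ← hN]
      push_cast
      ring
    rw [Finset.sum_congr rfl hterm, ← Nat.cast_sum]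
    rw [sum_shift_vandermonde M N (by omega)]
    have e3 : (m + L - 1).toNat = M + N := by omega
    have e4 : (m - 1).toNat = M - 1 := by omega
    rw [e3, e4]
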